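-- pv_equiv track=rewrite | github.com/cukier91/console_app | Dict.py | name_sorter
-- ===== SOURCE A (Python) =====
-- def name_sorter(names):
--     dict_names = {'male': '',
--                   'female': ''}
--     list_of_female_names = []
--     list_of_male_names = []
--     for name in names:
--         if name[-1] == 'a':
--             list_of_female_names.append(name)
--         else:
--             list_of_male_names.append(name)
--     dict_names['female'] = sorted(list_of_female_names)
--     dict_names['male'] = sorted(list_of_male_names)
--     return dict_names
-- ===== SOURCE B (Python) =====
-- def name_sorter(names):
--     female = []
--     male = []
--     for name in names:
--         bucket = female if name[-1] == 'a' else male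
--         i = 0
--         while i < len(bucket) and bucket[i] <= name:
--             i += 1
--         bucket.insert(i, name)
--     return {'male': male, 'female': female}
-- ===== Notes on version B (the rewrite author's own statement) =====
-- stated objective: alternative
-- what changed: B makes one pass that keeps each bucket sorted at all times by inserting every name at its sorted position (online insertion sort), instead of A's append-to-buckets followed by a batch sorted() per bucket.
import Mathlib
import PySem

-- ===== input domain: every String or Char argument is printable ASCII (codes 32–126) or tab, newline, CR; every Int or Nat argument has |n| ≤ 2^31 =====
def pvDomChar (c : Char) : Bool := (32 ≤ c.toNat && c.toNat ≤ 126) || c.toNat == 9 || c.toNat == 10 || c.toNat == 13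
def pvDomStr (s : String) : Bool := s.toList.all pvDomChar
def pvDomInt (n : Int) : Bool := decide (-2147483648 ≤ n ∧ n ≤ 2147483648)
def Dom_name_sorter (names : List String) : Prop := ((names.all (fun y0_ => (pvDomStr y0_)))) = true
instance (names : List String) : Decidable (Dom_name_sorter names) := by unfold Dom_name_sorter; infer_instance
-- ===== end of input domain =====

-- B replaces A's append-then-batch-sort by a single pass that keeps each bucket sorted
-- at all times, inserting every name at its sorted position (online insertion sort).

-- ===== PORT A =====
-- the Python step of A's loop: name[-1] == 'a' (none = IndexError, excluded by Pre_)
def pvStepA (acc : List String × List String) (name : String) : List String × List String :=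
  match PySem.Str.pyGet? name (-1) with
  | some c => if c == 'a' then (acc.1 ++ [name], acc.2) else (acc.1, acc.2 ++ [name])
  | none => acc

def name_sorter (names : List String) : List (String × List String) :=
  -- dict_names = {'male': '', 'female': ''}; the '' placeholders are dead (both keys are
  -- overwritten before return) and are ported as [] to keep the value type uniform
  let dict_names : PySem.Dict String (List String) :=
    (PySem.Dict.empty.insert "male" []).insert "female" []
  let acc := names.foldl pvStepA ([], [])
  let dict_names := dict_names.insert "female" (PySem.List.sorted acc.1 (fun x => x) false)
  let dict_names := dict_names.insert "male" (PySem.List.sorted acc.2 (fun x => x) false)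
  dict_names.items

-- ===== PORT B =====
-- B's inner while loop + bucket.insert(i, name): skip the prefix of elements ≤ name,
-- put name there (insertion into a sorted list)
def pvInsSorted (x : String) : List String → List String
  | [] => [x]
  | y :: t => if y ≤ x then y :: pvInsSorted x t else x :: y :: t

-- B's loop body: pick the bucket by name[-1] == 'a' and insert at the sorted position
def pvStepB (acc : List String × List String) (name : String) : List String × List String :=
  match PySem.Str.pyGet? name (-1) with
  | some c => if c == 'a' then (pvInsSorted name acc.1, acc.2) else (acc.1, pvInsSorted name acc.2)
  | none => acc

def name_sorter_alt (names : List String) : List (String × List String) :=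
  let acc := names.foldl pvStepB ([], [])
  [("male", acc.2), ("female", acc.1)]

-- ===== PRECONDITION & SPEC =====
-- Pre_ excludes lists containing the empty string, on which both A's and B's name[-1] raise IndexError.
def Pre_name_sorter (names : List String) : Prop := "" ∉ names
instance (names : List String) : Decidable (Pre_name_sorter names) := by unfold Pre_name_sorter; infer_instance
def pvWitness_name_sorter : List String := ["anna", "Bob", "eva", "Tom"]

def Spec_name_sorter (names : List String) (out : List (String × List String)) : Prop := out = name_sorter_alt names
instance (names : List String) (out : List (String × List String)) : Decidable (Spec_name_sorter names out) := by unfold Spec_name_sorter; infer_instance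

-- ===== CLAIM (what is proved, stated in full; the proofs are below) =====
def Claim_equal_name_sorter : Prop := ∀ (names : List String), Dom_name_sorter names → Pre_name_sorter names → Spec_name_sorter names (name_sorter names)

-- ===== LEMMAS AND PROOFS =====

-- on a nonempty char list, "last char == 'a'" is endswith ['a']
theorem lastA_l (l : List Char) (h : l ≠ []) :
    (match PySem.Chars.pyGet? l (-1) with | some c => c == 'a' | none => false)
      = PySem.Chars.endswith l ['a'] := by
  obtain ⟨l', c, rfl⟩ := (List.eq_nil_or_concat l).resolve_left h
  have h1 : PySem.Chars.pyGet? (l'.concat c) (-1) = some c := by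
    simp [PySem.Chars.pyGet?, PySem.List.pyGet?, PySem.List.pyIdx?, List.concat_eq_append]
  rw [h1]
  simp [PySem.Chars.endswith, List.isSuffixOf, List.concat_eq_append, List.isPrefixOf]
  exact eq_comm

theorem pyGetLast_some (l : List Char) (h : l ≠ []) :
    ∃ c, PySem.Chars.pyGet? l (-1) = some c := by
  obtain ⟨l', c, rfl⟩ := (List.eq_nil_or_concat l).resolve_left h
  exact ⟨c, by simp [PySem.Chars.pyGet?, PySem.List.pyGet?, PySem.List.pyIdx?, List.concat_eq_append]⟩

theorem stepA_eq (acc : List String × List String) (n : String) (h : n.toList ≠ []) :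
    pvStepA acc n = if PySem.Str.endswith n "a" then (acc.1 ++ [n], acc.2) else (acc.1, acc.2 ++ [n]) := by
  unfold pvStepA
  rw [show PySem.Str.pyGet? n (-1) = PySem.Chars.pyGet? n.toList (-1) from rfl]
  rw [show PySem.Str.endswith n "a" = PySem.Chars.endswith n.toList ['a'] from PySem.Str.endswith_eq n "a"]
  rw [← lastA_l n.toList h]
  obtain ⟨c, hc⟩ := pyGetLast_some n.toList h
  simp only [PySem.Chars.pyGet?] at hc
  simp [hc]

theorem stepB_eq (acc : List String × List String) (n : String) (h : n.toList ≠ []) :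
    pvStepB acc n = if PySem.Str.endswith n "a" then (pvInsSorted n acc.1, acc.2) else (acc.1, pvInsSorted n acc.2) := by
  unfold pvStepB
  rw [show PySem.Str.pyGet? n (-1) = PySem.Chars.pyGet? n.toList (-1) from rfl]
  rw [show PySem.Str.endswith n "a" = PySem.Chars.endswith n.toList ['a'] from PySem.Str.endswith_eq n "a"]
  rw [← lastA_l n.toList h]
  obtain ⟨c, hc⟩ := pyGetLast_some n.toList h
  simp only [PySem.Chars.pyGet?] at hc
  simp [hc]

theorem foldA_eq (names : List String) (a b : List String) (h : ∀ n ∈ names, n.toList ≠ []) :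
    names.foldl pvStepA (a, b)
      = (a ++ names.filter (fun n => PySem.Str.endswith n "a"),
         b ++ names.filter (fun n => !(PySem.Str.endswith n "a"))) := by
  induction names generalizing a b with
  | nil => simp
  | cons n t ih =>
    have hn := h n (List.mem_cons_self)
    have ht : ∀ m ∈ t, m.toList ≠ [] := fun m hm => h m (List.mem_cons_of_mem _ hm)
    simp only [List.foldl_cons, stepA_eq (a, b) n hn]
    by_cases hp : PySem.Str.endswith n "a"
    · have hp' : PySem.Chars.endswith n.toList ['a'] = true := by
        simpa [PySem.Str.endswith_eq] using hp
      rw [if_pos hp, ih _ _ ht]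
      simp [hp']
    · have hp' : PySem.Chars.endswith n.toList ['a'] = false := by
        simpa [PySem.Str.endswith_eq] using hp
      rw [if_neg hp, ih _ _ ht]
      simp [hp']

theorem insSorted_perm (x : String) (l : List String) : (pvInsSorted x l).Perm (x :: l) := by
  induction l with
  | nil => simp [pvInsSorted]
  | cons y t ih =>
    unfold pvInsSorted
    by_cases h : y ≤ x
    · rw [if_pos h]
      exact ((ih.cons y).trans (List.Perm.swap x y t))
    · rw [if_neg h]

theorem insSorted_pairwise (x : String) (l : List String)
    (h : l.Pairwise (· ≤ ·)) : (pvInsSorted x l).Pairwise (· ≤ ·) := by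
  induction l with
  | nil => simp [pvInsSorted]
  | cons y t ih =>
    rw [List.pairwise_cons] at h
    unfold pvInsSorted
    by_cases hy : y ≤ x
    · rw [if_pos hy]
      refine List.pairwise_cons.mpr ⟨?_, ih h.2⟩
      intro z hz
      rcases List.mem_cons.mp ((insSorted_perm x t).mem_iff.mp hz) with rfl | hz'
      · exact hy
      · exact h.1 z hz'
    · rw [if_neg hy]
      have hx : x ≤ y := le_of_lt (lt_of_not_ge hy)
      refine List.pairwise_cons.mpr ⟨?_, List.pairwise_cons.mpr ⟨h.1, h.2⟩⟩
      intro z hz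
      rcases List.mem_cons.mp hz with rfl | hz'
      · exact hx
      · exact le_trans hx (h.1 z hz')

def pvInsFold (l : List String) (xs : List String) : List String :=
  xs.foldl (fun acc x => pvInsSorted x acc) l

theorem insFold_perm (l xs : List String) : (pvInsFold l xs).Perm (l ++ xs) := by
  induction xs generalizing l with
  | nil => simp [pvInsFold]
  | cons x t ih =>
    simp only [pvInsFold, List.foldl_cons]
    refine (ih (pvInsSorted x l)).trans (((insSorted_perm x l).append_right t).trans ?_)
    exact List.perm_middle.symm

theorem insFold_pairwise (l xs : List String) (h : l.Pairwise (· ≤ ·)) :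
    (pvInsFold l xs).Pairwise (· ≤ ·) := by
  induction xs generalizing l with
  | nil => simpa [pvInsFold] using h
  | cons x t ih =>
    simp only [pvInsFold, List.foldl_cons]
    exact ih _ (insSorted_pairwise x l h)

theorem foldB_eq (names : List String) (a b : List String) (h : ∀ n ∈ names, n.toList ≠ []) :
    names.foldl pvStepB (a, b)
      = (pvInsFold a (names.filter (fun n => PySem.Str.endswith n "a")),
         pvInsFold b (names.filter (fun n => !(PySem.Str.endswith n "a")))) := by
  induction names generalizing a b with
  | nil => simp [pvInsFold]
  | cons n t ih =>
    have hn := h n (List.mem_cons_self)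
    have ht : ∀ m ∈ t, m.toList ≠ [] := fun m hm => h m (List.mem_cons_of_mem _ hm)
    simp only [List.foldl_cons, stepB_eq (a, b) n hn]
    by_cases hp : PySem.Str.endswith n "a"
    · have hp' : PySem.Chars.endswith n.toList ['a'] = true := by
        simpa [PySem.Str.endswith_eq] using hp
      rw [if_pos hp, ih _ _ ht]
      simp [hp', pvInsFold]
    · have hp' : PySem.Chars.endswith n.toList ['a'] = false := by
        simpa [PySem.Str.endswith_eq] using hp
      rw [if_neg hp, ih _ _ ht]
      simp [hp', pvInsFold]

-- B's incremental insertion sort of a list equals Python's sorted of it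
theorem insFold_eq_sorted (xs : List String) :
    pvInsFold [] xs = PySem.List.sorted xs (fun x => x) false := by
  refine List.Perm.eq_of_pairwise (le := fun a b : String => a ≤ b)
    (fun a b _ _ hab hba => le_antisymm hab hba)
    (insFold_pairwise [] xs (by simp))
    (by simpa using PySem.List.sorted_pairwise xs (fun x => x))
    (((List.nil_append xs ▸ insFold_perm [] xs : (pvInsFold [] xs).Perm xs)).trans
      (PySem.List.sorted_perm xs (fun x => x) false).symm)

theorem items_eq (M F : List String) :
    (((((PySem.Dict.empty.insert "male" ([] : List String)).insert "female" []).insert "female" F).insert "male" M)).items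
      = [("male", M), ("female", F)] := by
  simp [PySem.Dict.empty, PySem.Dict.insert]

-- ===== VERDICT (by name: the statement is the Claim_ definition above) =====
theorem name_sorter_spec : Claim_equal_name_sorter := by
  intro names _ hpre
  unfold Spec_name_sorter name_sorter name_sorter_alt
  have hne : ∀ n ∈ names, n.toList ≠ [] := by
    intro n hn he
    have : n = "" := by
      have := congrArg String.ofList he
      simpa using this
    exact hpre (this ▸ hn)
  rw [foldA_eq names [] [] hne, foldB_eq names [] [] hne]
  simp only [List.nil_append]
  rw [items_eq, insFold_eq_sorted, insFold_eq_sorted]
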